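-- pv_equiv track=rewrite | github.com/tyrakriv/2019Winter-CPE101Projects | calcdoku/calcdoku.py | validate_cols
-- ===== SOURCE A (Python) =====
-- def transpose(grid):
--     col = []
--     temp = []
--     for i in range(5):
--         for j in range(5):
--             temp.append(grid[j][i])
--         col.append(temp[i*5:i*5+5])
--     return col
--
-- def validate_cols(grid):
--     lis = []
--     temp = 0
--
--     col = transpose(grid)
--
--     for i in range(len(col)):
--         cnt = 0
--         for j in range(5):
--             temp = col[i][j]
--             for k in range(j+1,5):
--                 if temp == col[i][k]:
--                     cnt += 1
--
--         if cnt == 0: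
--             lis.append(True)
--         else:
--             lis.append(False)
--
--     if (False) in lis:
--         return False
--     else:
--         return True
-- ===== SOURCE B (Python) =====
-- def validate_cols(grid):
--     for i in range(5):
--         col = [grid[j][i] for j in range(5)]
--         if len(set(col)) != 5:
--             return False
--     return True
-- ===== Notes on version B (the rewrite author's own statement) =====
-- stated objective: simpler
-- what changed: Drops the transpose helper and the nested pairwise-comparison loops; B gathers each column directly and tests uniqueness with len(set(col)) != 5, returning False early.
import Mathlib
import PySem

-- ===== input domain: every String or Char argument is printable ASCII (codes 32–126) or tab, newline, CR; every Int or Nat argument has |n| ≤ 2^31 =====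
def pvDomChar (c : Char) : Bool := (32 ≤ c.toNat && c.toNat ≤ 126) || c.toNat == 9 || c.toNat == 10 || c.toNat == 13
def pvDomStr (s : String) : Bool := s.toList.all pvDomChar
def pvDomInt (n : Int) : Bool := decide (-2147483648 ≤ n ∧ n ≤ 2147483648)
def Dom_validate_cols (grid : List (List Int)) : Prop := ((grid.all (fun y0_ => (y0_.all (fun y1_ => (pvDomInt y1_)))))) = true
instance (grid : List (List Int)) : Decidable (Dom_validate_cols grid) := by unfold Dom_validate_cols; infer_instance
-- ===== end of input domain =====

-- B replaces the transpose helper plus nested pairwise-comparison loops by a direct per-column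
-- uniqueness test via set size (simpler); equivalence is proved on grids where A does not raise.

-- grid[j][i]; Pre_ guarantees both indices are in range, where pyGetD is exact
def pvCell (grid : List (List Int)) (j i : Int) : Int :=
  PySem.List.pyGetD (PySem.List.pyGetD grid j []) i 0

-- ===== PORT A =====
def pvTranspose (grid : List (List Int)) : List (List Int) :=
  let st := (PySem.List.pyRange 0 5 1).foldl (fun (st : List (List Int) × List Int) i =>
    let temp := (PySem.List.pyRange 0 5 1).foldl (fun t j => t ++ [pvCell grid j i]) st.2
    (st.1 ++ [PySem.List.slice temp (some (i*5)) (some (i*5+5))], temp))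
    (([], []) : List (List Int) × List Int)
  st.1

def validate_cols (grid : List (List Int)) : Bool :=
  let col := pvTranspose grid
  let lis := (PySem.List.pyRange 0 (col.length) 1).foldl (fun lis i =>
    let cnt := (PySem.List.pyRange 0 5 1).foldl (fun cnt j =>
      let temp := PySem.List.pyGetD (PySem.List.pyGetD col i []) j 0
      (PySem.List.pyRange (j+1) 5 1).foldl (fun cnt k =>
        if temp = PySem.List.pyGetD (PySem.List.pyGetD col i []) k 0 then cnt + 1 else cnt) cnt)
      (0 : Int)
    if cnt = 0 then lis ++ [true] else lis ++ [false]) ([] : List Bool)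
  if lis.contains false then false else true

-- ===== PORT B =====
def pvColumn (grid : List (List Int)) (i : Int) : List Int :=
  (PySem.List.pyRange 0 5 1).map (fun j => pvCell grid j i)

def pvCheckCols (grid : List (List Int)) : List Int → Bool
  | [] => true
  | i :: rest =>
    if (PySem.Set.ofList (pvColumn grid i)).length ≠ 5 then false
    else pvCheckCols grid rest

def validate_cols_alt (grid : List (List Int)) : Bool :=
  pvCheckCols grid (PySem.List.pyRange 0 5 1)

-- ===== PRECONDITION & SPEC =====
-- A raises IndexError unless the grid has at least 5 rows whose first 5 rows each have ≥ 5 entries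
def Pre_validate_cols (grid : List (List Int)) : Prop :=
  5 ≤ grid.length ∧ ∀ row ∈ grid.take 5, 5 ≤ row.length
instance (grid : List (List Int)) : Decidable (Pre_validate_cols grid) := by
  unfold Pre_validate_cols; infer_instance

def pvWitness_validate_cols : List (List Int) :=
  [[1,2,3,4,5],[2,3,4,5,1],[3,4,5,1,2],[4,5,1,2,3],[5,1,2,3,4]]

def Spec_validate_cols (grid : List (List Int)) (out : Bool) : Prop := out = validate_cols_alt grid
instance (grid : List (List Int)) (out : Bool) : Decidable (Spec_validate_cols grid out) := by
  unfold Spec_validate_cols; infer_instance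

-- ===== CLAIM (what is proved, stated in full; the proofs are below) =====
def Claim_equal_validate_cols : Prop := ∀ (grid : List (List Int)), Dom_validate_cols grid → Pre_validate_cols grid → Spec_validate_cols grid (validate_cols grid)

-- ===== LEMMAS AND PROOFS =====

-- A's inner double loop over one column (used only by the proofs)
def pvCntA (xs : List Int) : Int :=
  (PySem.List.pyRange 0 5 1).foldl (fun cnt j =>
    let temp := PySem.List.pyGetD xs j 0
    (PySem.List.pyRange (j+1) 5 1).foldl (fun cnt k =>
      if temp = PySem.List.pyGetD xs k 0 then cnt + 1 else cnt) cnt) (0 : Int)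

lemma pvCntA_spec (xs : List Int) :
    (PySem.List.pyRange 0 5 1).foldl (fun cnt j =>
      let temp := PySem.List.pyGetD xs j 0
      (PySem.List.pyRange (j+1) 5 1).foldl (fun cnt k =>
        if temp = PySem.List.pyGetD xs k 0 then cnt + 1 else cnt) cnt) (0 : Int) = pvCntA xs := rfl

lemma pvTranspose_eq (grid : List (List Int)) :
    pvTranspose grid =
      [[pvCell grid 0 0, pvCell grid 1 0, pvCell grid 2 0, pvCell grid 3 0, pvCell grid 4 0],
       [pvCell grid 0 1, pvCell grid 1 1, pvCell grid 2 1, pvCell grid 3 1, pvCell grid 4 1],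
       [pvCell grid 0 2, pvCell grid 1 2, pvCell grid 2 2, pvCell grid 3 2, pvCell grid 4 2],
       [pvCell grid 0 3, pvCell grid 1 3, pvCell grid 2 3, pvCell grid 3 3, pvCell grid 4 3],
       [pvCell grid 0 4, pvCell grid 1 4, pvCell grid 2 4, pvCell grid 3 4, pvCell grid 4 4]] := by
  simp [pvTranspose, show PySem.List.pyRange 0 5 1 = [0,1,2,3,4] from by decide,
        List.foldl, PySem.List.slice, PySem.List.clampIdx]

lemma pvFalseMemFoldl (P : Int → Prop) [DecidablePred P] (l : List Int) (acc : List Bool) :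
    (false ∈ l.foldl (fun lis i => if P i then lis ++ [true] else lis ++ [false]) acc) ↔
      (false ∈ acc ∨ ∃ i ∈ l, ¬ P i) := by
  induction l generalizing acc with
  | nil => simp
  | cons x xs ih =>
    by_cases h : P x <;> simp [List.foldl, h, ih]

set_option maxHeartbeats 2000000 in
lemma pvCnt0 (a b c d e : Int) :
    (pvCntA [a,b,c,d,e] = 0) ↔
      (¬a=b ∧ ¬a=c ∧ ¬a=d ∧ ¬a=e ∧ ¬b=c ∧ ¬b=d ∧ ¬b=e ∧ ¬c=d ∧ ¬c=e ∧ ¬d=e) := by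
  simp only [pvCntA,
    show PySem.List.pyRange 0 5 1 = [0,1,2,3,4] from by decide,
    List.foldl, PySem.List.foldl_ite_add_one]
  simp only [
    show PySem.List.pyRange (0+1) 5 1 = [1,2,3,4] from by decide,
    show PySem.List.pyRange (1+1) 5 1 = [2,3,4] from by decide,
    show PySem.List.pyRange (2+1) 5 1 = [3,4] from by decide,
    show PySem.List.pyRange (3+1) 5 1 = [4] from by decide,
    show PySem.List.pyRange (4+1) 5 1 = [] from by decide]
  simp only [List.countP, List.countP.go, Bool.cond_eq_ite, decide_eq_true_eq]
  simp only [
    show ∀ x0 x1 x2 x3 x4 : Int, PySem.List.pyGetD [x0,x1,x2,x3,x4] 0 0 = x0 from fun _ _ _ _ _ => rfl,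
    show ∀ x0 x1 x2 x3 x4 : Int, PySem.List.pyGetD [x0,x1,x2,x3,x4] 1 0 = x1 from fun _ _ _ _ _ => rfl,
    show ∀ x0 x1 x2 x3 x4 : Int, PySem.List.pyGetD [x0,x1,x2,x3,x4] 2 0 = x2 from fun _ _ _ _ _ => rfl,
    show ∀ x0 x1 x2 x3 x4 : Int, PySem.List.pyGetD [x0,x1,x2,x3,x4] 3 0 = x3 from fun _ _ _ _ _ => rfl,
    show ∀ x0 x1 x2 x3 x4 : Int, PySem.List.pyGetD [x0,x1,x2,x3,x4] 4 0 = x4 from fun _ _ _ _ _ => rfl]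
  split_ifs <;> omega

set_option maxHeartbeats 4000000 in
lemma pvSetLen (a b c d e : Int) :
    ((PySem.Set.ofList [a,b,c,d,e]).length = 5) ↔
      (¬a=b ∧ ¬a=c ∧ ¬a=d ∧ ¬a=e ∧ ¬b=c ∧ ¬b=d ∧ ¬b=e ∧ ¬c=d ∧ ¬c=e ∧ ¬d=e) := by
  simp only [PySem.Set.ofList, List.foldl, PySem.Set.add, PySem.Set.contains, PySem.Set.empty]
  split_ifs <;> simp_all <;> omega

lemma pvIteNot (p : Prop) [Decidable p] : (if p then false else true) = decide (¬p) := by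
  by_cases h : p <;> simp [h]

lemma pvCheckCols_eq (grid : List (List Int)) (l : List Int) :
    pvCheckCols grid l = decide (∀ i ∈ l, (PySem.Set.ofList (pvColumn grid i)).length = 5) := by
  induction l with
  | nil => simp [pvCheckCols]
  | cons x xs ih =>
    by_cases h : (PySem.Set.ofList (pvColumn grid x)).length = 5 <;>
      simp [pvCheckCols, h, ih]

set_option maxHeartbeats 2000000 in
lemma pvMainEq (grid : List (List Int)) : validate_cols grid = validate_cols_alt grid := by
  rw [validate_cols, validate_cols_alt]
  simp only [pvCntA_spec, pvTranspose_eq, List.length_cons, List.length_nil,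
    show (0+1+1+1+1+1 : ℕ) = 5 from rfl, Nat.cast_ofNat, List.contains_eq_mem]
  simp only [pvFalseMemFoldl
    (fun i => pvCntA (PySem.List.pyGetD
      [[pvCell grid 0 0, pvCell grid 1 0, pvCell grid 2 0, pvCell grid 3 0, pvCell grid 4 0],
       [pvCell grid 0 1, pvCell grid 1 1, pvCell grid 2 1, pvCell grid 3 1, pvCell grid 4 1],
       [pvCell grid 0 2, pvCell grid 1 2, pvCell grid 2 2, pvCell grid 3 2, pvCell grid 4 2],
       [pvCell grid 0 3, pvCell grid 1 3, pvCell grid 2 3, pvCell grid 3 3, pvCell grid 4 3],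
       [pvCell grid 0 4, pvCell grid 1 4, pvCell grid 2 4, pvCell grid 3 4, pvCell grid 4 4]] i []) = 0)]
  simp only [decide_eq_true_eq, List.not_mem_nil, false_or]
  rw [pvIteNot, pvCheckCols_eq, decide_eq_decide]
  rw [show (PySem.List.pyRange 0 5 1 : List Int) = [0,1,2,3,4] from by decide]
  simp [List.mem_cons, pvColumn, List.map,
    show (PySem.List.pyRange 0 5 1 : List Int) = [0,1,2,3,4] from by decide,
    show ∀ x0 x1 x2 x3 x4 : List Int, PySem.List.pyGetD [x0,x1,x2,x3,x4] 0 [] = x0 from fun _ _ _ _ _ => rfl,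
    show ∀ x0 x1 x2 x3 x4 : List Int, PySem.List.pyGetD [x0,x1,x2,x3,x4] 1 [] = x1 from fun _ _ _ _ _ => rfl,
    show ∀ x0 x1 x2 x3 x4 : List Int, PySem.List.pyGetD [x0,x1,x2,x3,x4] 2 [] = x2 from fun _ _ _ _ _ => rfl,
    show ∀ x0 x1 x2 x3 x4 : List Int, PySem.List.pyGetD [x0,x1,x2,x3,x4] 3 [] = x3 from fun _ _ _ _ _ => rfl,
    show ∀ x0 x1 x2 x3 x4 : List Int, PySem.List.pyGetD [x0,x1,x2,x3,x4] 4 [] = x4 from fun _ _ _ _ _ => rfl,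
    pvCnt0, pvSetLen]

-- ===== VERDICT (by name: the statement is the Claim_ definition above) =====
theorem validate_cols_spec : Claim_equal_validate_cols := by
  intro grid _ _
  unfold Spec_validate_cols
  exact pvMainEq grid
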